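-- pv_equiv track=rewrite | github.com/buddyd16/theToolbox | analysis/loadcombos.py | ACI_LoadPatterns
-- ===== SOURCE A (Python) =====
-- def ACI_LoadPatterns(n, byspan=True):
--     pat1 = [1 for i in range(1,n+1)] # all spans loaded
--     pat2 = [1 if i % 2 == 0 else 0 for i in range(1,n+1)] # even spans loaded
--     pat3 = [0 if i % 2 == 0 else 1 for i in range(1,n+1)] # odd spans loaded
--
--     count = 0
--     pat4 = []
--     pat5 = []
--     pat6 = []
--     for i in range(1,n+1):
--
--         if count<=1:
--             if count == 0:
--                 pat4.append(1)
--                 pat5.append(0)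
--                 pat6.append(1)
--             else:
--                 pat4.append(1)
--                 pat5.append(1)
--                 pat6.append(0)
--             count+=1
--         else:
--             pat4.append(0)
--             pat5.append(1)
--             pat6.append(1)
--             count=0
--
--     if n==1:
--         patterns = [pat1]
--
--     elif n==2:
--         patterns = [pat1,pat2,pat3]
--
--     elif n==3:
--         patterns = [pat1,pat2,pat3,pat4,pat5]
--
--     else:
--         patterns = [pat1,pat2,pat3,pat4,pat5,pat6]
--
--     if byspan == True:
--         patterns_transpose = list(map(list, zip(*patterns)))
--
--         return patterns_transpose
--     else:
--         return patterns
-- ===== SOURCE B (Python) =====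
-- def ACI_LoadPatterns(n, byspan=True):
--     # pattern membership by closed-form modular formulas; span-major build for byspan
--     if n == 1:
--         sel = [0]
--     elif n == 2:
--         sel = [0, 1, 2]
--     elif n == 3:
--         sel = [0, 1, 2, 3, 4]
--     else:
--         sel = [0, 1, 2, 3, 4, 5]
--
--     def val(p, i):
--         if p == 0:
--             return 1
--         if p == 1:
--             return 1 if i % 2 == 0 else 0
--         if p == 2:
--             return 0 if i % 2 == 0 else 1
--         r = (i - 1) % 3
--         if p == 3:
--             return 0 if r == 2 else 1
--         if p == 4:
--             return 0 if r == 0 else 1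
--         return 0 if r == 1 else 1
--
--     if byspan == True:
--         return [[val(p, i) for p in sel] for i in range(1, n + 1)]
--     else:
--         return [[val(p, i) for i in range(1, n + 1)] for p in sel]
-- ===== Notes on version B (the rewrite author's own statement) =====
-- stated objective: alternative
-- what changed: Replaces the stateful count loop and the zip(*) transpose with closed-form modular membership formulas per (pattern, span) and builds the result directly span-major (or pattern-major), selecting the pattern set from n first.
import Mathlib
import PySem

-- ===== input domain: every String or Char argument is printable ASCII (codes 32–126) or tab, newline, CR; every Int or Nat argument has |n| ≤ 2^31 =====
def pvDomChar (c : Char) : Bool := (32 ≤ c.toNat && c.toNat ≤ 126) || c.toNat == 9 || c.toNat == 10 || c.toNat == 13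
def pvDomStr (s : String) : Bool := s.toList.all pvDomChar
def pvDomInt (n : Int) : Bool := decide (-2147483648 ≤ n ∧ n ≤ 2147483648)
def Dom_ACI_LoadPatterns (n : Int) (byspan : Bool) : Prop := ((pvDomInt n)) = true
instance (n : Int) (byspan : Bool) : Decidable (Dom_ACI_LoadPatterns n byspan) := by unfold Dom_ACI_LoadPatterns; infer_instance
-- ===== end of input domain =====

-- B replaces A's stateful count loop and zip(*) transpose with closed-form modular
-- membership formulas and a direct span-major (or pattern-major) build; alternative, same cost.


-- ===== PORT A =====
-- the stateful count loop building pat4/pat5/pat6 (count, pat4, pat5, pat6)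
def aLoop (n : Int) : Int × List Int × List Int × List Int :=
  (PySem.List.pyRange 1 (n+1) 1).foldl
    (fun st _ =>
      let count := st.1
      let p4 := st.2.1
      let p5 := st.2.2.1
      let p6 := st.2.2.2
      if count ≤ 1 then
        if count = 0 then (count+1, p4 ++ [1], p5 ++ [0], p6 ++ [1])
        else (count+1, p4 ++ [1], p5 ++ [1], p6 ++ [0])
      else (0, p4 ++ [0], p5 ++ [1], p6 ++ [1]))
    (0, [], [], [])

-- heads and tails of a list of lists, Python zip truncation semantics
def aHeadsTails : List (List Int) → Option (List Int × List (List Int))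
  | [] => some ([], [])
  | [] :: _ => none
  | (x :: xs) :: rest =>
    match aHeadsTails rest with
    | none => none
    | some (hs, ts) => some (x :: hs, xs :: ts)

def aZipStarAux : List Int → List (List Int) → List (List Int)
  | [], _ => []
  | x :: xs, rest =>
    match aHeadsTails rest with
    | none => []
    | some (hs, ts) => (x :: hs) :: aZipStarAux xs ts

-- list(map(list, zip(*patterns))) for a nonempty argument list
def aZipStar : List (List Int) → List (List Int)
  | [] => []
  | first :: rest => aZipStarAux first rest

def ACI_LoadPatterns (n : Int) (byspan : Bool) : List (List Int) :=
  let pat1 := (PySem.List.pyRange 1 (n+1) 1).map (fun _ => (1:Int))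
  let pat2 := (PySem.List.pyRange 1 (n+1) 1).map (fun i => if PySem.Int.mod i 2 = 0 then (1:Int) else 0)
  let pat3 := (PySem.List.pyRange 1 (n+1) 1).map (fun i => if PySem.Int.mod i 2 = 0 then (0:Int) else 1)
  let st := aLoop n
  let pat4 := st.2.1
  let pat5 := st.2.2.1
  let pat6 := st.2.2.2
  let patterns :=
    if n = 1 then [pat1]
    else if n = 2 then [pat1, pat2, pat3]
    else if n = 3 then [pat1, pat2, pat3, pat4, pat5]
    else [pat1, pat2, pat3, pat4, pat5, pat6]
  if byspan = true then aZipStar patterns else patterns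

-- ===== PORT B =====
def bSel (n : Int) : List Int :=
  if n = 1 then [0]
  else if n = 2 then [0, 1, 2]
  else if n = 3 then [0, 1, 2, 3, 4]
  else [0, 1, 2, 3, 4, 5]

def bVal (p i : Int) : Int :=
  if p = 0 then 1
  else if p = 1 then (if PySem.Int.mod i 2 = 0 then 1 else 0)
  else if p = 2 then (if PySem.Int.mod i 2 = 0 then 0 else 1)
  else
    let r := PySem.Int.mod (i - 1) 3
    if p = 3 then (if r = 2 then 0 else 1)
    else if p = 4 then (if r = 0 then 0 else 1)
    else (if r = 1 then 0 else 1)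

def ACI_LoadPatterns_alt (n : Int) (byspan : Bool) : List (List Int) :=
  let sel := bSel n
  if byspan = true then
    (PySem.List.pyRange 1 (n+1) 1).map (fun i => sel.map (fun p => bVal p i))
  else
    sel.map (fun p => (PySem.List.pyRange 1 (n+1) 1).map (fun i => bVal p i))

-- ===== PRECONDITION & SPEC =====
def Spec_ACI_LoadPatterns (n : Int) (byspan : Bool) (out : List (List Int)) : Prop := out = ACI_LoadPatterns_alt n byspan
instance (n : Int) (byspan : Bool) (out : List (List Int)) : Decidable (Spec_ACI_LoadPatterns n byspan out) := by unfold Spec_ACI_LoadPatterns; infer_instance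

-- ===== CLAIM (what is proved, stated in full; the proofs are below) =====
def Claim_equal_ACI_LoadPatterns : Prop := ∀ (n : Int) (byspan : Bool), Dom_ACI_LoadPatterns n byspan → Spec_ACI_LoadPatterns n byspan (ACI_LoadPatterns n byspan)

-- ===== LEMMAS AND PROOFS =====

theorem aHeadsTails_maps (x : Int) (xs : List Int) (fs : List (Int → Int)) :
    aHeadsTails (fs.map (fun g => g x :: xs.map g)) =
      some (fs.map (fun g => g x), fs.map (fun g => xs.map g)) := by
  induction fs with
  | nil => simp [aHeadsTails]
  | cons f fs ih => simp [aHeadsTails, ih]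

theorem aZipStarAux_maps (xs : List Int) (f : Int → Int) (fs : List (Int → Int)) :
    aZipStarAux (xs.map f) (fs.map (fun g => xs.map g)) =
      xs.map (fun x => f x :: fs.map (fun g => g x)) := by
  induction xs generalizing fs with
  | nil => simp [aZipStarAux]
  | cons x xs ih =>
    simp only [List.map_cons]
    rw [show (fs.map fun g => g x :: xs.map g) = fs.map ((fun g => g x :: xs.map g)) from rfl]
    simp only [aZipStarAux, aHeadsTails_maps]
    rw [ih fs]

theorem aLoop_eq (m : Nat) :
    aLoop (m : Int) = (((m % 3 : Nat) : Int),
      (List.range m).map (fun k : Nat => bVal 3 (1 + (k:Int))),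
      (List.range m).map (fun k : Nat => bVal 4 (1 + (k:Int))),
      (List.range m).map (fun k : Nat => bVal 5 (1 + (k:Int)))) := by
  induction m with
  | zero => simp [aLoop, PySem.List.pyRange_one_eq_nil]
  | succ m ih =>
    have hc : (((m+1 : Nat)) : Int) = (m : Int) + 1 := by push_cast; ring
    have h1 : PySem.List.pyRange 1 ((m:Int)+1+1) 1 =
        PySem.List.pyRange 1 ((m:Int)+1) 1 ++ [(m:Int)+1] :=
      PySem.List.pyRange_one_succ_right (by omega)
    unfold aLoop at ih ⊢
    rw [hc, h1, List.foldl_append, ih]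
    have hb3 : bVal 3 (1 + (m:Int)) = if m % 3 = 2 then 0 else 1 := by
      simp [bVal, show (1:Int) + (m:Int) - 1 = (m:Int) by ring]
      omega
    have hb4 : bVal 4 (1 + (m:Int)) = if m % 3 = 0 then 0 else 1 := by
      simp [bVal, show (1:Int) + (m:Int) - 1 = (m:Int) by ring]
      omega
    have hb5 : bVal 5 (1 + (m:Int)) = if m % 3 = 1 then 0 else 1 := by
      simp [bVal, show (1:Int) + (m:Int) - 1 = (m:Int) by ring]
      omega
    have h3 : m % 3 = 0 ∨ m % 3 = 1 ∨ m % 3 = 2 := by omega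
    rcases h3 with h | h | h <;>
      simp [List.range_succ, h, hb3, hb4, hb5] <;>
      omega

-- ===== VERDICT (by name: the statement is the Claim_ definition above) =====
theorem ACI_LoadPatterns_spec : Claim_equal_ACI_LoadPatterns := by
  intro n byspan _
  unfold Spec_ACI_LoadPatterns
  by_cases hn : 0 ≤ n
  · obtain ⟨m, rfl⟩ := Int.eq_ofNat_of_zero_le hn
    have ht : (((m:Int)+1-1)).toNat = m := by omega
    have hR : PySem.List.pyRange 1 ((m:Int)+1) 1 = (List.range m).map (fun k : Nat => 1 + (k:Int)) := by
      apply List.ext_getElem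
      · simp [PySem.List.length_pyRange_one, ht]
      · intro i hi1 hi2
        simp [PySem.List.getElem_pyRange_one, ht]
    have e0 : (PySem.List.pyRange 1 ((m:Int)+1) 1).map (fun _ => (1:Int)) = (PySem.List.pyRange 1 ((m:Int)+1) 1).map (bVal 0) :=
      List.map_congr_left (fun i _ => by simp [bVal])
    have e1 : (PySem.List.pyRange 1 ((m:Int)+1) 1).map (fun i => if PySem.Int.mod i 2 = 0 then (1:Int) else 0) = (PySem.List.pyRange 1 ((m:Int)+1) 1).map (bVal 1) :=
      List.map_congr_left (fun i _ => by simp [bVal])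
    have e2 : (PySem.List.pyRange 1 ((m:Int)+1) 1).map (fun i => if PySem.Int.mod i 2 = 0 then (0:Int) else 1) = (PySem.List.pyRange 1 ((m:Int)+1) 1).map (bVal 2) :=
      List.map_congr_left (fun i _ => by simp [bVal])
    have e3 : (aLoop ((m:Nat):Int)).2.1 = (PySem.List.pyRange 1 ((m:Int)+1) 1).map (bVal 3) := by
      rw [aLoop_eq, hR, List.map_map]; rfl
    have e4 : (aLoop ((m:Nat):Int)).2.2.1 = (PySem.List.pyRange 1 ((m:Int)+1) 1).map (bVal 4) := by
      rw [aLoop_eq, hR, List.map_map]; rfl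
    have e5 : (aLoop ((m:Nat):Int)).2.2.2 = (PySem.List.pyRange 1 ((m:Int)+1) 1).map (bVal 5) := by
      rw [aLoop_eq, hR, List.map_map]; rfl
    have hzip : ∀ (xs : List Int) (f : Int → Int) (fs : List (Int → Int)),
        aZipStar ((f :: fs).map (fun g => xs.map g)) = xs.map (fun x => (f :: fs).map (fun g => g x)) :=
      fun xs f fs => by simpa using aZipStarAux_maps xs f fs
    simp only [ACI_LoadPatterns, ACI_LoadPatterns_alt, bSel]
    rw [e0, e1, e2, e3, e4, e5]
    cases byspan
    · rw [if_neg (by decide : ¬(false = true)), if_neg (by decide : ¬(false = true))]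
      by_cases h1 : ((m:Int)) = 1
      · rw [if_pos h1, if_pos h1]; simp
      · rw [if_neg h1, if_neg h1]
        by_cases h2 : ((m:Int)) = 2
        · rw [if_pos h2, if_pos h2]; simp
        · rw [if_neg h2, if_neg h2]
          by_cases h3 : ((m:Int)) = 3
          · rw [if_pos h3, if_pos h3]; simp
          · rw [if_neg h3, if_neg h3]; simp
    · rw [if_pos (Eq.refl true), if_pos (Eq.refl true)]
      by_cases h1 : ((m:Int)) = 1
      · rw [if_pos h1, if_pos h1]
        simpa using hzip (PySem.List.pyRange 1 ((m:Int)+1) 1) (bVal 0) []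
      · rw [if_neg h1, if_neg h1]
        by_cases h2 : ((m:Int)) = 2
        · rw [if_pos h2, if_pos h2]
          simpa using hzip (PySem.List.pyRange 1 ((m:Int)+1) 1) (bVal 0) [bVal 1, bVal 2]
        · rw [if_neg h2, if_neg h2]
          by_cases h3 : ((m:Int)) = 3
          · rw [if_pos h3, if_pos h3]
            simpa using hzip (PySem.List.pyRange 1 ((m:Int)+1) 1) (bVal 0) [bVal 1, bVal 2, bVal 3, bVal 4]
          · rw [if_neg h3, if_neg h3]
            simpa using hzip (PySem.List.pyRange 1 ((m:Int)+1) 1) (bVal 0) [bVal 1, bVal 2, bVal 3, bVal 4, bVal 5]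
  · have hemp : PySem.List.pyRange 1 (n+1) 1 = [] := PySem.List.pyRange_one_eq_nil (by omega)
    have h1 : n ≠ 1 := by omega
    have h2 : n ≠ 2 := by omega
    have h3 : n ≠ 3 := by omega
    unfold ACI_LoadPatterns ACI_LoadPatterns_alt aLoop bSel
    rw [hemp]
    cases byspan <;> simp [h1, h2, h3, aZipStar, aZipStarAux]
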